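-- pv_equiv track=rewrite | github.com/23mattm/advent-of-code-23 | day1/day01_part1.py | find_spelled_digit
-- ===== SOURCE A (Python) =====
-- def find_spelled_digit(string: str) -> int:
--     num_dict = {
--         'zero': 0,
--         'one': 1,
--         'two': 2,
--         'three': 3,
--         'four': 4,
--         'five': 5,
--         'six': 6,
--         'seven': 7,
--         'eight': 8,
--         'nine': 9
--     }
--     for num in num_dict:
--         if string.find(num) == 0:
--             return num_dict[num]
--
--     return -1
-- ===== SOURCE B (Python) =====
-- def find_spelled_digit(string: str) -> int:
--     # decision tree on the first character: at most two tail comparisons, no dict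
--     head = string[:1]
--     if head == 'z':
--         return 0 if string[1:4] == 'ero' else -1
--     if head == 'o':
--         return 1 if string[1:3] == 'ne' else -1
--     if head == 't':
--         if string[1:3] == 'wo':
--             return 2
--         if string[1:5] == 'hree':
--             return 3
--         return -1
--     if head == 'f':
--         if string[1:4] == 'our':
--             return 4
--         if string[1:4] == 'ive':
--             return 5
--         return -1
--     if head == 's':
--         if string[1:3] == 'ix':
--             return 6
--         if string[1:5] == 'even':
--             return 7
--         return -1
--     if head == 'e':
--         return 8 if string[1:5] == 'ight' else -1
--     if head == 'n':
--         return 9 if string[1:4] == 'ine' else -1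
--     return -1
-- ===== Notes on version B (the rewrite author's own statement) =====
-- stated objective: alternative
-- what changed: Replaces A's dict of ten words scanned with string.find(word)==0 by a dictless decision tree: dispatch on the first character, then compare at most two fixed tail slices; correct because the ten words are distinguished by their first letter (plus one tail test) and no word is a prefix of another.
import Mathlib
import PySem

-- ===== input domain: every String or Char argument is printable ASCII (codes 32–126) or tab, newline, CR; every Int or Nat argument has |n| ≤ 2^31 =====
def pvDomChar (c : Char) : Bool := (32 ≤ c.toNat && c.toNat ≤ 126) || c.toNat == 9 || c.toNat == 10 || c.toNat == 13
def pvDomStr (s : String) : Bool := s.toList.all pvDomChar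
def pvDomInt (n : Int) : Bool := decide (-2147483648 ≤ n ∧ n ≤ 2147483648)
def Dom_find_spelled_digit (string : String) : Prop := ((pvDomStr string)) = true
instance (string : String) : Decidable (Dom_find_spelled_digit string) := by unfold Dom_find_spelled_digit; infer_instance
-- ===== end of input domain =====

-- B replaces A's dict of ten words scanned with string.find(word)==0 by a dictless
-- decision tree: dispatch on the first character, then at most two fixed tail-slice
-- comparisons; same value everywhere (the first letter plus one tail test determines
-- the word, and no word is a prefix of another). Objective: alternative.

-- ===== PORT A =====
-- A: for num in num_dict: if string.find(num) == 0: return num_dict[num]; return -1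
-- (iterating the dict's (key, value) pairs in insertion order)
def fsdScan (s : String) : List (String × Int) → Int
  | [] => -1
  | (num, v) :: rest => if PySem.Str.find s num = 0 then v else fsdScan s rest

def find_spelled_digit (string : String) : Int :=
  let num_dict : List (String × Int) := [("zero",(0:Int)),("one",1),("two",2),("three",3),("four",4),("five",5),("six",6),("seven",7),("eight",8),("nine",9)]
  fsdScan string num_dict

-- ===== PORT B =====
-- B: head = string[:1]; nested ifs on head, then compare string[1:n] against the
-- fixed tail(s) of the word(s) starting with that letter. The head dispatch plus
-- tail slices string[1:n] are rendered as a match on toList's head constructor with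
-- rest.take (n-1) (= string[1:n]) compared to the literal tail.
def fsdTree : List Char → Int
  | 'z' :: rest => if rest.take 3 = ['e','r','o'] then 0 else -1
  | 'o' :: rest => if rest.take 2 = ['n','e'] then 1 else -1
  | 't' :: rest => if rest.take 2 = ['w','o'] then 2
                   else if rest.take 4 = ['h','r','e','e'] then 3 else -1
  | 'f' :: rest => if rest.take 3 = ['o','u','r'] then 4
                   else if rest.take 3 = ['i','v','e'] then 5 else -1
  | 's' :: rest => if rest.take 2 = ['i','x'] then 6
                   else if rest.take 4 = ['e','v','e','n'] then 7 else -1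
  | 'e' :: rest => if rest.take 4 = ['i','g','h','t'] then 8 else -1
  | 'n' :: rest => if rest.take 3 = ['i','n','e'] then 9 else -1
  | _ => -1

def find_spelled_digit_alt (string : String) : Int :=
  fsdTree string.toList

-- ===== PRECONDITION & SPEC =====
def Spec_find_spelled_digit (string : String) (out : Int) : Prop := out = find_spelled_digit_alt string
instance (string : String) (out : Int) : Decidable (Spec_find_spelled_digit string out) := by unfold Spec_find_spelled_digit; infer_instance

-- ===== CLAIM (what is proved, stated in full; the proofs are below) =====
def Claim_equal_find_spelled_digit : Prop := ∀ (string : String), Dom_find_spelled_digit string → Spec_find_spelled_digit string (find_spelled_digit string)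

-- ===== LEMMAS AND PROOFS =====

lemma fsd_go_pos (sub : List Char) : ∀ (t : List Char) (k : Nat), PySem.Chars.find.go sub t (k + 1) ≠ 0
  | [], k => by
    simp only [PySem.Chars.find.go]
    split <;> omega
  | c :: t, k => by
    rw [PySem.Chars.find.go]
    split
    · exact_mod_cast Nat.succ_ne_zero k
    · exact fsd_go_pos sub t (k + 1)

lemma find_eq_zero_iff (cs w : List Char) :
    PySem.Chars.find cs w = 0 ↔ List.take w.length cs = w := by
  unfold PySem.Chars.find
  cases cs with
  | nil =>
    cases w <;> simp [PySem.Chars.find.go]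
  | cons c t =>
    rw [PySem.Chars.find.go]
    by_cases hp : w.isPrefixOf (c :: t)
    · have hq := List.prefix_iff_eq_take.mp (List.isPrefixOf_iff_prefix.mp hp)
      simp [hp]
      exact hq.symm
    · simp only [hp]
      constructor
      · intro h; exact absurd h (fsd_go_pos w t 0)
      · intro h
        exact absurd (List.isPrefixOf_iff_prefix.mpr (List.prefix_iff_eq_take.mpr h.symm)) hp

-- A's result as a chain of prefix tests on the character list
lemma fsd_A_char (s : String) : find_spelled_digit s =
    (if s.toList.take 4 = ['z','e','r','o'] then 0
     else if s.toList.take 3 = ['o','n','e'] then 1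
     else if s.toList.take 3 = ['t','w','o'] then 2
     else if s.toList.take 5 = ['t','h','r','e','e'] then 3
     else if s.toList.take 4 = ['f','o','u','r'] then 4
     else if s.toList.take 4 = ['f','i','v','e'] then 5
     else if s.toList.take 3 = ['s','i','x'] then 6
     else if s.toList.take 5 = ['s','e','v','e','n'] then 7
     else if s.toList.take 5 = ['e','i','g','h','t'] then 8
     else if s.toList.take 4 = ['n','i','n','e'] then 9
     else -1) := by
  simp only [find_spelled_digit, fsdScan, PySem.Str.find, find_eq_zero_iff]
  rfl

-- ===== VERDICT (by name: the statement is the Claim_ definition above) =====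
theorem find_spelled_digit_spec : Claim_equal_find_spelled_digit := by
  intro s _
  unfold Spec_find_spelled_digit find_spelled_digit_alt
  rw [fsd_A_char]
  cases hl : s.toList with
  | nil => simp [fsdTree]
  | cons c rest =>
    by_cases hz : c = 'z'
    · subst hz; simp [fsdTree, List.take_succ_cons]
    by_cases ho : c = 'o'
    · subst ho; simp [fsdTree, List.take_succ_cons]
    by_cases ht : c = 't'
    · subst ht; simp [fsdTree, List.take_succ_cons]
    by_cases hf : c = 'f'
    · subst hf; simp [fsdTree, List.take_succ_cons]
    by_cases hs : c = 's'
    · subst hs; simp [fsdTree, List.take_succ_cons]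
    by_cases he : c = 'e'
    · subst he; simp [fsdTree, List.take_succ_cons]
    by_cases hn : c = 'n'
    · subst hn; simp [fsdTree, List.take_succ_cons]
    have htree : fsdTree (c :: rest) = -1 := by
      rw [fsdTree.eq_def]
      split <;> simp_all
    rw [htree]
    simp [List.take_succ_cons, hz, ho, ht, hf, hs, he, hn]
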